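-- pv_equiv track=rewrite | github.com/jetfan-xin/SimultaneousTranslation | experiments/xcomet_3.0/xcomet_compare_s1_gt_100.py | get_char_mask
-- ===== SOURCE A (Python) =====
-- from typing import List, Dict, Any, Tuple
--
-- def get_char_mask(length: int, spans: List[Dict[str, Any]]) -> List[bool]:
--     mask = [False] * length
--     for span in spans or []:
--         s = span.get("start")
--         e = span.get("end")
--         if s is None or e is None:
--             continue
--         s = max(0, min(int(s), length))
--         e = max(s, min(int(e), length))
--         for i in range(s, e):
--             mask[i] = True
--     return mask
-- ===== SOURCE B (Python) =====
-- from typing import List, Dict, Any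
--
-- def get_char_mask(length: int, spans: List[Dict[str, Any]]) -> List[bool]:
--     n = max(length, 0)
--     diff = [0] * (n + 1)
--     for span in spans or []:
--         s = span.get("start")
--         e = span.get("end")
--         if s is None or e is None:
--             continue
--         s = max(0, min(int(s), length))
--         e = max(s, min(int(e), length))
--         diff[s] += 1
--         diff[e] -= 1
--     mask = []
--     run = 0
--     for d in diff[:n]:
--         run += d
--         mask.append(run > 0)
--     return mask
-- ===== Notes on version B (the rewrite author's own statement) =====
-- stated objective: alternative
-- what changed: Replaces A's per-span inner loop that writes True into every covered mask cell by a difference array (+1 at clamped start, -1 at clamped end) and a single prefix-sum pass that emits run>0 per character.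
import Mathlib
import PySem

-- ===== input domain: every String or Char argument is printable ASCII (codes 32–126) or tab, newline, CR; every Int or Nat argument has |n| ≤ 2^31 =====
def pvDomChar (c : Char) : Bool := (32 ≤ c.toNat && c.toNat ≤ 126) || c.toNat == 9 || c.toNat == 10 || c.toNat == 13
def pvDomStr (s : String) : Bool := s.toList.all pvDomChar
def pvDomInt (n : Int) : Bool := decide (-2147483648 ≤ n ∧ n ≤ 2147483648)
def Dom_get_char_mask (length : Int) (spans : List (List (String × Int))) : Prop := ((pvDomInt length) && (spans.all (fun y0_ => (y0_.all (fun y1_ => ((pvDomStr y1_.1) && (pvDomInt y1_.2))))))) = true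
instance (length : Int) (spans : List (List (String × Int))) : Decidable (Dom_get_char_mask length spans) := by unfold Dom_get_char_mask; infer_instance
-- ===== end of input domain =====

-- B replaces A's per-span inner write loop by a difference array (+1 at clamped start,
-- -1 at clamped end) followed by one prefix-sum pass emitting run > 0 per character:
-- a genuinely different algorithm of similar measured cost (objective: alternative).

-- ===== PORT A =====
-- 'spans or []' iterates the same elements as 'spans' for a list argument; 'int(s)' is the
-- identity on Int. 'mask[i] = True' is List.set i.toNat: exact here because every i produced
-- by range(s, e) satisfies 0 ≤ s ≤ i < e ≤ len(mask).
def get_char_mask (length : Int) (spans : List (List (String × Int))) : List Bool :=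
  let mask := List.replicate length.toNat false      -- [False] * length ([] for length ≤ 0)
  spans.foldl (fun mask span =>
    match (PySem.Dict.mk span).get? "start", (PySem.Dict.mk span).get? "end" with
    | some s0, some e0 =>
      let s := max 0 (min s0 length)
      let e := max s (min e0 length)
      (PySem.List.pyRange s e 1).foldl (fun m i => m.set i.toNat true) mask
    | _, _ => mask) mask

-- ===== PORT B =====
-- 'diff[s] += 1' is List.modify s.toNat: exact because 0 ≤ s ≤ e ≤ n < len(diff);
-- 'diff[:n]' is List.take n (slice with nonnegative in-range bound).
def get_char_mask_alt (length : Int) (spans : List (List (String × Int))) : List Bool :=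
  let n := (max length 0).toNat
  let diff := List.replicate (n + 1) (0 : Int)
  let diff := spans.foldl (fun diff span =>
    match (PySem.Dict.mk span).get? "start" with
    | none => diff
    | some s0 =>
      match (PySem.Dict.mk span).get? "end" with
      | none => diff
      | some e0 =>
        let s := max 0 (min s0 length)
        let e := max s (min e0 length)
        (diff.modify s.toNat (· + 1)).modify e.toNat (· + (-1))) diff
  ((diff.take n).foldl (fun (p : Int × List Bool) d =>
      (p.1 + d, p.2 ++ [decide (p.1 + d > 0)])) ((0 : Int), ([] : List Bool))).2

-- ===== PRECONDITION & SPEC =====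
def Spec_get_char_mask (length : Int) (spans : List (List (String × Int))) (out : List Bool) : Prop := out = get_char_mask_alt length spans
instance (length : Int) (spans : List (List (String × Int))) (out : List Bool) : Decidable (Spec_get_char_mask length spans out) := by unfold Spec_get_char_mask; infer_instance

-- ===== CLAIM (what is proved, stated in full; the proofs are below) =====
def Claim_equal_get_char_mask : Prop := ∀ (length : Int) (spans : List (List (String × Int))), Dom_get_char_mask length spans → Spec_get_char_mask length spans (get_char_mask length spans)

-- ===== LEMMAS AND PROOFS =====

-- whether a span (after A's clamping) covers character index i
def pvCov (length : Int) (i : Nat) (span : List (String × Int)) : Bool :=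
  match (PySem.Dict.mk span).get? "start", (PySem.Dict.mk span).get? "end" with
  | some s0, some e0 =>
    let s := max 0 (min s0 length)
    let e := max s (min e0 length)
    decide (s ≤ (i : Int) ∧ (i : Int) < e)
  | _, _ => false

theorem pv_setRange_getElem? (e : Int) : ∀ (s : Int) (m : List Bool) (i : Nat), 0 ≤ s →
    e ≤ (m.length : Int) →
    ((PySem.List.pyRange s e 1).foldl (fun m i => m.set i.toNat true) m)[i]? =
      if s ≤ (i : Int) ∧ (i : Int) < e then some true else m[i]? := by
  suffices h : ∀ (n : Nat) (s : Int) (m : List Bool), (e - s).toNat ≤ n → 0 ≤ s →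
      e ≤ (m.length : Int) → ∀ (i : Nat),
      ((PySem.List.pyRange s e 1).foldl (fun m i => m.set i.toNat true) m)[i]? =
        if s ≤ (i : Int) ∧ (i : Int) < e then some true else m[i]? by
    intro s m i hs he
    exact h (e - s).toNat s m le_rfl hs he i
  intro n
  induction n with
  | zero =>
    intro s m hn hs he i
    rw [PySem.List.pyRange_one_eq_nil (by omega)]
    simp only [List.foldl_nil]
    rw [if_neg (by omega)]
  | succ n ih =>
    intro s m hn hs he i
    by_cases hlt : s < e
    · rw [PySem.List.pyRange_one_cons hlt]
      simp only [List.foldl_cons]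
      rw [ih (s + 1) (m.set s.toNat true) (by omega) (by omega) (by simpa using he) i]
      simp only [List.getElem?_set, List.length_set]
      split_ifs with h1 h2 h3 h4 h5 <;> first | rfl | omega
    · rw [PySem.List.pyRange_one_eq_nil (by omega)]
      simp only [List.foldl_nil]
      rw [if_neg (by omega)]

theorem pv_setRange_length (e : Int) (s : Int) (m : List Bool) :
    ((PySem.List.pyRange s e 1).foldl (fun m i => m.set i.toNat true) m).length = m.length := by
  suffices h : ∀ (l : List Int) (m : List Bool),
      (l.foldl (fun m i => m.set i.toNat true) m).length = m.length from h _ m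
  intro l
  induction l with
  | nil => intro m; rfl
  | cons a t ih => intro m; simp [List.foldl_cons, ih]

theorem pv_A_foldl (length : Int) : ∀ (spans : List (List (String × Int))) (m : List Bool)
    (hm : (m.length : Int) = max length 0) (i : Nat),
    (spans.foldl (fun mask span =>
      match (PySem.Dict.mk span).get? "start", (PySem.Dict.mk span).get? "end" with
      | some s0, some e0 =>
        let s := max 0 (min s0 length)
        let e := max s (min e0 length)
        (PySem.List.pyRange s e 1).foldl (fun m i => m.set i.toNat true) mask
      | _, _ => mask) m)[i]? =
      if spans.any (pvCov length i) then some true else m[i]? := by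
  intro spans
  induction spans with
  | nil => intro m hm i; simp
  | cons sp rest ih =>
    intro m hm i
    simp only [List.foldl_cons, List.any_cons]
    cases h1 : (PySem.Dict.mk sp).get? "start" with
    | none =>
      simp only [h1]
      rw [ih m hm i]
      simp [pvCov, h1]
    | some s0 =>
      cases h2 : (PySem.Dict.mk sp).get? "end" with
      | none =>
        simp only [h1, h2]
        rw [ih m hm i]
        simp [pvCov, h1, h2]
      | some e0 =>
        simp only [h1, h2]
        rw [ih _ (by rw [pv_setRange_length]; exact hm) i]
        rw [pv_setRange_getElem? _ _ _ _ (by omega) (by omega)]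
        simp only [pvCov, h1, h2]
        by_cases hc : max 0 (min s0 length) ≤ (i : Int) ∧
            (i : Int) < max (max 0 (min s0 length)) (min e0 length)
        · rw [if_pos hc, decide_eq_true hc]
          cases h : rest.any (pvCov length i) <;> simp [h]
        · rw [if_neg hc, decide_eq_false hc]
          simp

theorem pv_modify_take_sum (c : Int) : ∀ (d : List Int) (j k : Nat), j < d.length →
    ((d.modify j (· + c)).take k).sum = (d.take k).sum + if j < k then c else 0 := by
  intro d
  induction d with
  | nil => intro j k h; simp at h
  | cons a t ih =>
    intro j k h
    cases j with
    | zero =>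
      cases k with
      | zero => simp
      | succ k => simp [List.take_succ_cons, List.sum_cons]; ring
    | succ j =>
      cases k with
      | zero => simp
      | succ k =>
        simp only [List.modify_succ_cons, List.take_succ_cons, List.sum_cons]
        rw [ih j k (by simpa using h)]
        split_ifs with h1 h2 h3 <;> first | (exfalso; omega) | ring

theorem pv_B_foldl_sum (length : Int) : ∀ (spans : List (List (String × Int))) (d : List Int)
    (hd : d.length = (max length 0).toNat + 1) (i : Nat) (hi : i < (max length 0).toNat),
    ((spans.foldl (fun diff span =>
      match (PySem.Dict.mk span).get? "start" with
      | none => diff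
      | some s0 =>
        match (PySem.Dict.mk span).get? "end" with
        | none => diff
        | some e0 =>
          let s := max 0 (min s0 length)
          let e := max s (min e0 length)
          (diff.modify s.toNat (· + 1)).modify e.toNat (· + (-1))) d).take (i + 1)).sum =
      (d.take (i + 1)).sum + (spans.countP (pvCov length i) : Int) := by
  intro spans
  induction spans with
  | nil => intro d hd i hi; simp
  | cons sp rest ih =>
    intro d hd i hi
    simp only [List.foldl_cons, List.countP_cons]
    cases h1 : (PySem.Dict.mk sp).get? "start" with
    | none =>
      simp only [h1]
      rw [ih d hd i hi]
      simp [pvCov, h1]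
    | some s0 =>
      cases h2 : (PySem.Dict.mk sp).get? "end" with
      | none =>
        simp only [h1, h2]
        rw [ih d hd i hi]
        simp [pvCov, h1, h2]
      | some e0 =>
        simp only [h1, h2]
        rw [ih _ (by simp [hd]) i hi]
        rw [pv_modify_take_sum (-1) _ _ _ (by simp [hd]; omega)]
        rw [pv_modify_take_sum 1 _ _ _ (by rw [hd]; omega)]
        simp only [pvCov, h1, h2]
        by_cases hc : max 0 (min s0 length) ≤ (i : Int) ∧
            (i : Int) < max (max 0 (min s0 length)) (min e0 length)
        · rw [decide_eq_true hc, if_pos rfl]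
          rw [if_pos (show (max 0 (min s0 length)).toNat < i + 1 by omega)]
          rw [if_neg (show ¬ (max (max 0 (min s0 length)) (min e0 length)).toNat < i + 1 by omega)]
          push_cast
          ring
        · rw [decide_eq_false hc, if_neg Bool.false_ne_true]
          split_ifs with ha hb <;> first | (exfalso; omega) | (push_cast; ring)

theorem pv_B_foldl_length (length : Int) : ∀ (spans : List (List (String × Int))) (d : List Int),
    (spans.foldl (fun diff span =>
      match (PySem.Dict.mk span).get? "start" with
      | none => diff
      | some s0 =>
        match (PySem.Dict.mk span).get? "end" with
        | none => diff
        | some e0 =>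
          let s := max 0 (min s0 length)
          let e := max s (min e0 length)
          (diff.modify s.toNat (· + 1)).modify e.toNat (· + (-1))) d).length = d.length := by
  intro spans
  induction spans with
  | nil => intro d; rfl
  | cons sp rest ih =>
    intro d
    simp only [List.foldl_cons]
    cases h1 : (PySem.Dict.mk sp).get? "start" with
    | none => simp only [h1]; exact ih d
    | some s0 =>
      cases h2 : (PySem.Dict.mk sp).get? "end" with
      | none => simp only [h1, h2]; exact ih d
      | some e0 =>
        simp only [h1, h2]
        rw [ih]
        simp

theorem pv_scan (l : List Int) : ∀ (a : Int) (m : List Bool),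
    (l.foldl (fun (p : Int × List Bool) d => (p.1 + d, p.2 ++ [decide (p.1 + d > 0)])) (a, m)).2 =
      m ++ (List.range l.length).map (fun i => decide (a + (l.take (i + 1)).sum > 0)) := by
  induction l with
  | nil => intro a m; simp
  | cons d t ih =>
    intro a m
    simp only [List.foldl_cons]
    rw [ih (a + d) (m ++ [decide (a + d > 0)])]
    simp only [List.length_cons, List.range_succ_eq_map, List.map_cons, List.map_map,
      List.take_succ_cons, List.sum_cons, List.take_zero, List.sum_nil, List.append_assoc,
      List.singleton_append]
    congr 2
    · simp
    · apply List.map_congr_left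
      intro i _
      simp [Function.comp_apply, add_assoc]

theorem pv_cov_oob (length : Int) (i : Nat) (h : (max length 0).toNat ≤ i)
    (sp : List (String × Int)) : pvCov length i sp = false := by
  cases h1 : (PySem.Dict.mk sp).get? "start" with
  | none => simp [pvCov, h1]
  | some s0 =>
    cases h2 : (PySem.Dict.mk sp).get? "end" with
    | none => simp [pvCov, h1, h2]
    | some e0 =>
      simp only [pvCov, h1, h2]
      exact decide_eq_false (by omega)

theorem pv_A_eq (length : Int) (spans : List (List (String × Int))) :
    get_char_mask length spans =
      (List.range (max length 0).toNat).map (fun i => spans.any (pvCov length i)) := by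
  apply List.ext_getElem?
  intro i
  simp only [get_char_mask]
  rw [pv_A_foldl length spans _ (by simp only [List.length_replicate]; omega) i]
  by_cases hi : i < (max length 0).toNat
  · rw [List.getElem?_map, List.getElem?_range hi]
    cases h : spans.any (pvCov length i) with
    | true => simp [h]
    | false =>
      simp only [h, Bool.false_eq_true, if_false, Option.map_some]
      rw [List.getElem?_replicate]
      rw [if_pos (by omega)]
  · have hany : spans.any (pvCov length i) = false := by
      rw [List.any_eq_false]
      intro sp _
      simp [pv_cov_oob length i (by omega) sp]
    simp only [hany, Bool.false_eq_true, if_false]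
    rw [List.getElem?_replicate, if_neg (by omega)]
    rw [List.getElem?_eq_none (by simp only [List.length_map, List.length_range]; omega)]

theorem pv_B_eq (length : Int) (spans : List (List (String × Int))) :
    get_char_mask_alt length spans =
      (List.range (max length 0).toNat).map
        (fun i => decide (0 < (spans.countP (pvCov length i) : Int))) := by
  simp only [get_char_mask_alt]
  rw [pv_scan]
  have hlen : (spans.foldl (fun diff span =>
      match (PySem.Dict.mk span).get? "start" with
      | none => diff
      | some s0 =>
        match (PySem.Dict.mk span).get? "end" with
        | none => diff
        | some e0 =>
          let s := max 0 (min s0 length)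
          let e := max s (min e0 length)
          (diff.modify s.toNat (· + 1)).modify e.toNat (· + (-1))) (List.replicate ((max length 0).toNat + 1) (0 : Int))).length =
      (max length 0).toNat + 1 := by
    rw [pv_B_foldl_length]; simp
  rw [List.nil_append, List.length_take, hlen]
  rw [min_eq_left (by omega)]
  apply List.map_congr_left
  intro i hi
  rw [List.mem_range] at hi
  rw [List.take_take, min_eq_left (by omega)]
  rw [pv_B_foldl_sum length spans _ (by simp) i hi]
  have h0 : (List.take (i + 1) (List.replicate ((max length 0).toNat + 1) (0 : Int))).sum = 0 := by
    simp [List.take_replicate]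
  rw [h0]
  simp only [zero_add, gt_iff_lt]

-- ===== VERDICT (by name: the statement is the Claim_ definition above) =====
theorem get_char_mask_spec : Claim_equal_get_char_mask := by
  intro length spans _
  unfold Spec_get_char_mask
  rw [pv_A_eq, pv_B_eq]
  apply List.map_congr_left
  intro i _
  have h : (0 < (spans.countP (pvCov length i) : Int)) ↔ spans.any (pvCov length i) = true := by
    rw [Int.natCast_pos, List.countP_pos_iff, List.any_eq_true]
  by_cases hp : 0 < (spans.countP (pvCov length i) : Int)
  · rw [decide_eq_true hp, h.mp hp]
  · rw [decide_eq_false hp]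
    cases ha : spans.any (pvCov length i) with
    | false => rfl
    | true => exact absurd (h.mpr ha) hp
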